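-- pv_equiv track=rewrite | github.com/seo01/SpotPics | src/common_colors.py | get_common_colors_div
-- ===== SOURCE A (Python) =====
-- def get_common_colors_div(colors,grid=True):
--     div = ""
--     div += "<div class='grid'>"
--     count = 0
--     for (freq,color) in colors:
--         for i in range(freq):
--             if grid and count % 4 == 0:
--                 div+= "<br/>"
--             div+= "<div class='circle' style='background-color:rgb(%s,%s,%s)'></div>"%color
--             count += 1
--     div += "</div>"
--     return div
-- ===== SOURCE B (Python) =====
-- def get_common_colors_div(colors, grid=True):
--     flat = [color for (freq, color) in colors for _ in range(freq)]
--     div = "<div class='grid'>"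
--     for i in range(0, len(flat), 4):
--         if grid:
--             div += "<br/>"
--         for color in flat[i:i+4]:
--             div += "<div class='circle' style='background-color:rgb(%s,%s,%s)'></div>" % color
--     div += "</div>"
--     return div
-- ===== Notes on version B (the rewrite author's own statement) =====
-- stated objective: alternative
-- what changed: B first flattens the (freq,color) pairs into one per-circle color list and then emits it in chunks of 4 via range(0, len, 4) with one <br/> per chunk, replacing A's nested loops guarded by a running count % 4 counter.
import Mathlib
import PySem

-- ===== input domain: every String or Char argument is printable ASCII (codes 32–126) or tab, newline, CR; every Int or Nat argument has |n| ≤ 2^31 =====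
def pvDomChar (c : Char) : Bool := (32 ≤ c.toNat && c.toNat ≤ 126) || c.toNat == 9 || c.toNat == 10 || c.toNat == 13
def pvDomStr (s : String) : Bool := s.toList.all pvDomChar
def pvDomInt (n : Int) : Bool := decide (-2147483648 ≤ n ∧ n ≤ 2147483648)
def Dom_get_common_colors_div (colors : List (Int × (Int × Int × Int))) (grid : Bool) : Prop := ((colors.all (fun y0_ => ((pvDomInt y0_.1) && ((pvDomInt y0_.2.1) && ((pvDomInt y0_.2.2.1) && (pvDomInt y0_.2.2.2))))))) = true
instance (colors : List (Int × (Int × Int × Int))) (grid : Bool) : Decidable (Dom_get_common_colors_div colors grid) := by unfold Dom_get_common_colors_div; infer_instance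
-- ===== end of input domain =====

-- B replaces A's running-counter `count % 4` guard by flattening the (freq,color) pairs into one
-- per-circle color list and consuming it in chunks of 4 via range(0, len, 4)
-- (objective: alternative decomposition, similar cost).

-- ===== PORT A =====
-- "<div class='circle' style='background-color:rgb(%s,%s,%s)'></div>" % color
def pvCircle (c : Int × Int × Int) : String :=
  "<div class='circle' style='background-color:rgb(" ++ PySem.Int.toStr c.1 ++ "," ++
    PySem.Int.toStr c.2.1 ++ "," ++ PySem.Int.toStr c.2.2 ++ ")'></div>"

-- body of A's inner loop: the (div, count) update for one circle
def pvStepA (grid : Bool) (c : Int × Int × Int) (st : String × Int) : String × Int :=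
  let d := if grid && (PySem.Int.mod st.2 4 == 0) then st.1 ++ "<br/>" else st.1
  (d ++ pvCircle c, st.2 + 1)

def get_common_colors_div (colors : List (Int × (Int × Int × Int))) (grid : Bool) : String :=
  (colors.foldl
    (fun (st : String × Int) fc =>
      (PySem.List.pyRange 0 fc.1 1).foldl (fun st2 _ => pvStepA grid fc.2 st2) st)
    ("" ++ "<div class='grid'>", (0 : Int))).1 ++ "</div>"

-- ===== PORT B =====
-- flat = [color for (freq, color) in colors for _ in range(freq)]
def pvFlat (colors : List (Int × (Int × Int × Int))) : List (Int × Int × Int) :=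
  colors.flatMap (fun fc => (PySem.List.pyRange 0 fc.1 1).map (fun _ => fc.2))

-- for i in range(0, len(flat), 4): one <br/> (if grid), then the circles of flat[i:i+4]
def get_common_colors_div_alt (colors : List (Int × (Int × Int × Int))) (grid : Bool) : String :=
  let flat := pvFlat colors
  (PySem.List.pyRange 0 (flat.length : Int) 4).foldl
    (fun div i =>
      (PySem.List.slice flat (some i) (some (i + 4))).foldl (fun a c => a ++ pvCircle c)
        (if grid then div ++ "<br/>" else div))
    "<div class='grid'>" ++ "</div>"

-- ===== PRECONDITION & SPEC =====
def Spec_get_common_colors_div (colors : List (Int × (Int × Int × Int))) (grid : Bool) (out : String) : Prop := out = get_common_colors_div_alt colors grid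
instance (colors : List (Int × (Int × Int × Int))) (grid : Bool) (out : String) : Decidable (Spec_get_common_colors_div colors grid out) := by unfold Spec_get_common_colors_div; infer_instance

-- ===== CLAIM (what is proved, stated in full; the proofs are below) =====
def Claim_equal_get_common_colors_div : Prop := ∀ (colors : List (Int × (Int × Int × Int))) (grid : Bool), Dom_get_common_colors_div colors grid → Spec_get_common_colors_div colors grid (get_common_colors_div colors grid)

-- ===== LEMMAS AND PROOFS =====

-- proof-side middle form: the chunks-of-4 recursion on the suffix still to be emitted
def pvChunkLoop (grid : Bool) (l : List (Int × Int × Int)) (div : String) : String :=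
  if h : l = [] then div
  else
    pvChunkLoop grid (l.drop 4)
      ((l.take 4).foldl (fun a c => a ++ pvCircle c) (if grid then div ++ "<br/>" else div))
termination_by l.length
decreasing_by cases l with
  | nil => exact absurd rfl h
  | cons x t => simp

-- A's nested loops over the (freq,color) pairs are the single per-circle fold over the flattened list
theorem pv_flat_fold (grid : Bool) (colors : List (Int × (Int × Int × Int))) (p : String × Int) :
    colors.foldl
      (fun (st : String × Int) fc =>
        (PySem.List.pyRange 0 fc.1 1).foldl (fun st2 _ => pvStepA grid fc.2 st2) st) p
    = (pvFlat colors).foldl (fun st c => pvStepA grid c st) p := by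
  induction colors generalizing p with
  | nil => simp [pvFlat]
  | cons a t ih =>
    have hf : pvFlat (a :: t) = (PySem.List.pyRange 0 a.1 1).map (fun _ => a.2) ++ pvFlat t := by
      simp only [pvFlat, List.flatMap_cons]
    rw [List.foldl_cons, ih, hf, List.foldl_append, List.foldl_map]

theorem pv_dvd4 (n : Int) (h : (4:Int) ∣ n) :
    ¬ (4:Int) ∣ (n+1) ∧ ¬ (4:Int) ∣ (n+1+1) ∧ ¬ (4:Int) ∣ (n+1+1+1) ∧ (4:Int) ∣ (n+1+1+1+1) := by
  omega

-- the counter fold equals the chunked recursion whenever the counter sits at a chunk boundary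
theorem pv_chunk_eq (grid : Bool) (l : List (Int × Int × Int)) (s : String) (n : Int)
    (h : (4:Int) ∣ n) :
    (l.foldl (fun st c => pvStepA grid c st) (s, n)).1 = pvChunkLoop grid l s := by
  obtain ⟨h1, h2, h3, h4⟩ := pv_dvd4 n h
  match l with
  | [] => rw [pvChunkLoop]; simp
  | [a] => rw [pvChunkLoop, pvChunkLoop]; simp [pvStepA, h]
  | [a, b] => rw [pvChunkLoop, pvChunkLoop]; simp [pvStepA, h, h1]
  | [a, b, c] => rw [pvChunkLoop, pvChunkLoop]; simp [pvStepA, h, h1, h2]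
  | a :: b :: c :: d :: r =>
    have e0 : ∀ (c : Int × Int × Int) (s' : String),
        pvStepA grid c (s', n) = ((if grid then s' ++ "<br/>" else s') ++ pvCircle c, n + 1) := by
      intro c s'; simp [pvStepA, h]
    have e1 : ∀ (c : Int × Int × Int) (s' : String),
        pvStepA grid c (s', n+1) = (s' ++ pvCircle c, n + 1 + 1) := by
      intro c s'; simp [pvStepA, h1]
    have e2 : ∀ (c : Int × Int × Int) (s' : String),
        pvStepA grid c (s', n+1+1) = (s' ++ pvCircle c, n + 1 + 1 + 1) := by
      intro c s'; simp [pvStepA, h2]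
    have e3 : ∀ (c : Int × Int × Int) (s' : String),
        pvStepA grid c (s', n+1+1+1) = (s' ++ pvCircle c, n + 1 + 1 + 1 + 1) := by
      intro c s'; simp [pvStepA, h3]
    rw [pvChunkLoop, dif_neg (List.cons_ne_nil _ _)]
    simp only [List.foldl_cons, e0, e1, e2, e3, List.take_succ_cons, List.take_zero,
      List.drop_succ_cons, List.drop_zero, List.foldl_nil]
    exact pv_chunk_eq grid r _ (n+1+1+1+1) h4
termination_by l.length

-- range(a, b, 4) induction forms
theorem pv_pyRange4_nil (a b : Int) (h : b ≤ a) : PySem.List.pyRange a b 4 = [] := by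
  rw [PySem.List.pyRange_of_pos _ _ (by norm_num)]
  rw [if_neg (not_lt.mpr h)]
  simp

theorem pv_pyRange4_cons (a b : Int) (h : a < b) :
    PySem.List.pyRange a b 4 = a :: PySem.List.pyRange (a + 4) b 4 := by
  rw [PySem.List.pyRange_of_pos _ _ (by norm_num), PySem.List.pyRange_of_pos _ _ (by norm_num)]
  rw [if_pos h]
  have hm : ((b - a + 4 - 1) / 4).toNat
      = (if a + 4 < b then ((b - (a + 4) + 4 - 1) / 4).toNat else 0) + 1 := by
    split_ifs with h2 <;> omega
  rw [hm, List.range_succ_eq_map]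
  simp only [List.map_cons, List.map_map, Nat.cast_zero, mul_zero, add_zero, List.cons.injEq,
    true_and]
  apply List.map_congr_left
  intro k _
  simp [Function.comp]
  ring

-- the index-chunk fold from position k equals the chunked recursion on the suffix from k
theorem pv_idx_eq (grid : Bool) (flat : List (Int × Int × Int)) (k : Nat) (s : String) :
    (PySem.List.pyRange (k : Int) (flat.length : Int) 4).foldl
      (fun div i =>
        (PySem.List.slice flat (some i) (some (i + 4))).foldl (fun a c => a ++ pvCircle c)
          (if grid then div ++ "<br/>" else div)) s
    = pvChunkLoop grid (flat.drop k) s := by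
  by_cases hk : k < flat.length
  · rw [pv_pyRange4_cons _ _ (by exact_mod_cast hk), List.foldl_cons]
    have hslice : PySem.List.slice flat (some (k : Int)) (some ((k : Int) + 4))
        = (flat.drop k).take 4 := by
      have := PySem.List.slice_natCast_add flat k 4
      exact_mod_cast this
    have hs : ((k : Int) + 4) = ((k + 4 : Nat) : Int) := by push_cast; ring
    rw [hslice, hs, pv_idx_eq grid flat (k + 4)]
    conv_rhs => rw [pvChunkLoop]
    rw [dif_neg (by simp only [List.drop_eq_nil_iff]; omega), List.drop_drop]
  · rw [pv_pyRange4_nil _ _ (by exact_mod_cast not_lt.mp hk), List.foldl_nil,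
      List.drop_eq_nil_of_le (not_lt.mp hk), pvChunkLoop]
    simp
termination_by flat.length - k
decreasing_by omega

-- ===== VERDICT (by name: the statement is the Claim_ definition above) =====
theorem get_common_colors_div_spec : Claim_equal_get_common_colors_div := by
  intro colors grid _
  unfold Spec_get_common_colors_div get_common_colors_div get_common_colors_div_alt
  rw [pv_flat_fold, pv_chunk_eq _ _ _ _ (show (4:Int) ∣ 0 by norm_num),
    show ("" ++ "<div class='grid'>" : String) = "<div class='grid'>" from by decide]
  have h := pv_idx_eq grid (pvFlat colors) 0 "<div class='grid'>"
  rw [Nat.cast_zero, List.drop_zero] at h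
  rw [← h]
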